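-- pv_equiv track=rewrite | github.com/RamananVr/Leetcodepython | arrays/2731_movement_of_robots.py | sum_of_distances_after_queries_optimized
-- ===== SOURCE A (Python) =====
-- def sum_of_distances_after_queries_optimized(nums: list[int], s: str, d: int) -> int:
--     """
--     Optimized version using mathematical formula for sum of distances.
--     For sorted array, sum of distances = sum of (2*i - n + 1) * arr[i] for each i.
--
--     Args:
--         nums: Initial positions of robots
--         s: Direction string
--         d: Number of seconds
--
--     Returns:
--         int: Sum of distances between all pairs modulo 10^9 + 7
--
--     Time Complexity: O(n log n) - due to sorting
--     Space Complexity: O(n) - for storing final positions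
--     """
--     MOD = 10**9 + 7
--     n = len(nums)
--
--     # Calculate final positions
--     final_positions = []
--     for i in range(n):
--         if s[i] == 'L':
--             final_positions.append(nums[i] - d)
--         else:
--             final_positions.append(nums[i] + d)
--
--     # Sort final positions
--     final_positions.sort()
--
--     # Use mathematical formula: for each position at index i,
--     # it contributes (2*i - n + 1) * position to the total sum
--     total_distance = 0
--     for i in range(n):
--         contribution = ((2 * i - n + 1) * final_positions[i]) % MOD
--         total_distance = (total_distance + contribution) % MOD
--
--     return total_distance
-- ===== SOURCE B (Python) =====
-- def sum_of_distances_after_queries_optimized(nums: list[int], s: str, d: int) -> int: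
--     MOD = 10**9 + 7
--     rest = [x - d if c == 'L' else x + d for x, c in zip(nums, s)]
--     total = 0
--     while rest:
--         x, rest = rest[0], rest[1:]
--         total += sum(abs(x - y) for y in rest)
--     return total % MOD
-- ===== Notes on version B (the rewrite author's own statement) =====
-- stated objective: alternative
-- what changed: Drops the sort and the coefficient formula entirely: B sums |p_i - p_j| over all pairs of moved positions directly (quadratic brute force) and reduces mod once at the end.
import Mathlib
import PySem

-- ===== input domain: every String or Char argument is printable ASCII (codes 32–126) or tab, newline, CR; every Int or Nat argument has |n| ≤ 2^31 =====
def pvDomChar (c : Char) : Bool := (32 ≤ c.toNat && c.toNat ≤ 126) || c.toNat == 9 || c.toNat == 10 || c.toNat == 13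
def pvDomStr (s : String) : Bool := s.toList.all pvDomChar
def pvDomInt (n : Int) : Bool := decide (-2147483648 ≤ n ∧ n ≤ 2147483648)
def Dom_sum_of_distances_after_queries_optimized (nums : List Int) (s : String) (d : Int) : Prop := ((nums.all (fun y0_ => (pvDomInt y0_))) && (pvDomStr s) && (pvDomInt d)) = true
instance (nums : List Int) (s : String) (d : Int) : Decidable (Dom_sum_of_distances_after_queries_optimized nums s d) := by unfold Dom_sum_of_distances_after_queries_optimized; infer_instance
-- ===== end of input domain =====

-- B drops A's sort + coefficient formula entirely: it sums |p_i - p_j| over all pairs of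
-- moved positions directly and reduces mod once at the end (objective: alternative; B is quadratic).


-- ===== PORT A =====
-- the loop building final_positions; the `.getD ' '` default on s[i] is reached only
-- outside Pre_ (where Python raises IndexError)
def pvFinalA (nums : List Int) (s : String) (d : Int) : List Int :=
  (PySem.List.pyRange 0 (nums.length : Int)).foldl
    (fun acc i =>
      acc ++ [if (PySem.Str.pyGet? s i).getD ' ' = 'L'
              then PySem.List.pyGetD nums i 0 - d
              else PySem.List.pyGetD nums i 0 + d]) []

def sum_of_distances_after_queries_optimized (nums : List Int) (s : String) (d : Int) : Int :=
  (PySem.List.pyRange 0 (nums.length : Int)).foldl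
    (fun total i =>
      PySem.Int.mod
        (total + PySem.Int.mod
          ((2 * i - (nums.length : Int) + 1) *
            PySem.List.pyGetD (PySem.List.sorted (pvFinalA nums s d) (fun x => x) false) i 0)
          (10 ^ 9 + 7))
        (10 ^ 9 + 7)) 0

-- ===== PORT B =====
-- B's while-loop: pull off the head, add its distances to every remaining element, recurse on the rest
def pvPairSum : List Int → Int
  | [] => 0
  | x :: rest => ((rest.map (fun y => |x - y|)).sum + pvPairSum rest)

def sum_of_distances_after_queries_optimized_alt (nums : List Int) (s : String) (d : Int) : Int :=
  PySem.Int.mod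
    (pvPairSum ((nums.zip s.toList).map (fun p => if p.2 = 'L' then p.1 - d else p.1 + d)))
    (10 ^ 9 + 7)

-- ===== PRECONDITION & SPEC =====
-- Pre_ excludes exactly the inputs where A raises IndexError on s[i] (string shorter than nums)
def Pre_sum_of_distances_after_queries_optimized (nums : List Int) (s : String) (d : Int) : Prop :=
  nums.length ≤ s.toList.length
instance (nums : List Int) (s : String) (d : Int) : Decidable (Pre_sum_of_distances_after_queries_optimized nums s d) := by unfold Pre_sum_of_distances_after_queries_optimized; infer_instance

def pvWitness_sum_of_distances_after_queries_optimized : List Int × String × Int := ([1, 0], "RL", 2)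

def Spec_sum_of_distances_after_queries_optimized (nums : List Int) (s : String) (d : Int) (out : Int) : Prop := out = sum_of_distances_after_queries_optimized_alt nums s d
instance (nums : List Int) (s : String) (d : Int) (out : Int) : Decidable (Spec_sum_of_distances_after_queries_optimized nums s d out) := by unfold Spec_sum_of_distances_after_queries_optimized; infer_instance

-- ===== CLAIM (what is proved, stated in full; the proofs are below) =====
def Claim_equal_sum_of_distances_after_queries_optimized : Prop := ∀ (nums : List Int) (s : String) (d : Int), Dom_sum_of_distances_after_queries_optimized nums s d → Pre_sum_of_distances_after_queries_optimized nums s d → Spec_sum_of_distances_after_queries_optimized nums s d (sum_of_distances_after_queries_optimized nums s d)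

-- ===== LEMMAS AND PROOFS =====

-- signed sum that A's coefficient loop accumulates (with index offset j)
def pvCsum : List Int → Int → Int
  | [], _ => 0
  | x :: r, j => (j - (r.length : Int)) * x + pvCsum r (j + 1)

-- a fold that reduces mod M at every step computes (start + Σ terms) mod M
theorem pvModfold {ι : Type} (idx : List ι) (f : ι → Int) : ∀ (t : Int),
    0 ≤ t → t < 1000000007 →
    idx.foldl (fun t i => PySem.Int.mod (t + PySem.Int.mod (f i) 1000000007) 1000000007) t
      = (t + (idx.map f).sum) % 1000000007 := by
  induction idx with
  | nil => intro t h0 h1; simpa using (Int.emod_eq_of_lt h0 h1).symm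
  | cons a r ih =>
    intro t h0 h1
    simp only [List.foldl_cons, List.map_cons, List.sum_cons]
    rw [PySem.Int.mod_eq_emod_of_pos (by norm_num), PySem.Int.mod_eq_emod_of_pos (by norm_num),
        ih _ (Int.emod_nonneg _ (by norm_num)) (Int.emod_lt_of_pos _ (by norm_num))]
    omega

-- A's coefficient terms sum to pvCsum
theorem pvAsum (l : List Int) : ∀ (j : Int),
    ((List.range l.length).map
      (fun (k : Nat) => (j + 2 * (k : Int) - (l.length : Int) + 1) * l.getD k 0)).sum = pvCsum l j := by
  induction l with
  | nil => intro j; simp [pvCsum]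
  | cons x r ih =>
    intro j
    rw [List.length_cons, List.range_succ_eq_map]
    simp only [List.map_cons, List.sum_cons, List.map_map]
    have hmap : (List.map
        ((fun (k : Nat) => (j + 2 * (k : Int) - ((r.length + 1 : Nat) : Int) + 1) * (x :: r).getD k 0) ∘ Nat.succ)
        (List.range r.length))
        = List.map (fun (k : Nat) => ((j + 1) + 2 * (k : Int) - (r.length : Int) + 1) * r.getD k 0)
            (List.range r.length) := by
      apply List.map_congr_left
      intro k _
      simp only [Function.comp, List.getD_cons_succ, Nat.succ_eq_add_one]
      push_cast
      ring
    rw [hmap, ih (j + 1)]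
    simp only [pvCsum, List.getD_cons_zero]
    push_cast
    ring

-- pvCsum is affine in the index offset
theorem pvCsum_shift (l : List Int) : ∀ (j : Int), pvCsum l j = pvCsum l 0 + j * l.sum := by
  induction l with
  | nil => intro j; simp [pvCsum]
  | cons x r ih =>
    intro j
    simp only [pvCsum, List.sum_cons, ih (j + 1)]
    rw [ih (0 + 1)]
    ring

-- the pairwise-distance sum is invariant under permutation of the list
theorem pvPairSum_perm {l l' : List Int} (h : l.Perm l') : pvPairSum l = pvPairSum l' := by
  induction h with
  | nil => rfl
  | cons x h ih =>
    simp only [pvPairSum, ih, (h.map (fun y => |x - y|)).sum_eq]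
  | swap x y r =>
    simp only [pvPairSum, List.map_cons, List.sum_cons, abs_sub_comm x y]
    ring
  | trans _ _ ih1 ih2 => exact ih1.trans ih2

theorem pvSumMapSub (r : List Int) (x : Int) :
    (r.map (fun y => y - x)).sum = r.sum - (r.length : Int) * x := by
  induction r with
  | nil => simp
  | cons a t ih => simp only [List.map_cons, List.sum_cons, List.length_cons, ih]; push_cast; ring

-- on a nondecreasing list the pairwise-distance sum equals A's coefficient sum
theorem pvPairSum_sorted (l : List Int) (h : l.Pairwise (· ≤ ·)) :
    pvPairSum l = pvCsum l 0 := by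
  induction l with
  | nil => rfl
  | cons x r ih =>
    have hx : ∀ y ∈ r, x ≤ y := (List.pairwise_cons.mp h).1
    have hr := (List.pairwise_cons.mp h).2
    have habs : r.map (fun y => |x - y|) = r.map (fun y => y - x) := by
      apply List.map_congr_left
      intro y hy
      have := hx y hy
      rw [abs_sub_comm, abs_of_nonneg (by omega)]
    simp only [pvPairSum, pvCsum, habs, pvSumMapSub, ih hr]
    rw [pvCsum_shift r (0 + 1)]
    ring

-- under Pre_, A's final_positions list equals B's zip-built list
theorem pvBuild_eq (nums : List Int) (cs : List Char) (d : Int) (h : nums.length ≤ cs.length) :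
    (List.range nums.length).map
      (fun k => if (cs[k]?).getD ' ' = 'L' then nums.getD k 0 - d else nums.getD k 0 + d)
      = (nums.zip cs).map (fun p => if p.2 = 'L' then p.1 - d else p.1 + d) := by
  induction nums generalizing cs with
  | nil => simp
  | cons x r ih =>
    cases cs with
    | nil => simp at h
    | cons c cs' =>
      rw [List.length_cons, List.range_succ_eq_map, List.map_cons, List.map_map,
          List.zip_cons_cons, List.map_cons, ← ih cs' (by simpa using h)]
      simp [Function.comp]

theorem pvFinalA_eq (nums : List Int) (s : String) (d : Int)
    (h : nums.length ≤ s.toList.length) :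
    pvFinalA nums s d
      = (nums.zip s.toList).map (fun p => if p.2 = 'L' then p.1 - d else p.1 + d) := by
  unfold pvFinalA
  rw [PySem.List.pyRange_zero_natCast, List.foldl_map,
      PySem.List.foldl_append_singleton_eq_map, List.nil_append]
  refine Eq.trans (List.map_congr_left ?_) (pvBuild_eq nums s.toList d h)
  intro k _
  simp

-- ===== VERDICT (by name: the statement is the Claim_ definition above) =====
theorem sum_of_distances_after_queries_optimized_spec : Claim_equal_sum_of_distances_after_queries_optimized := by
  intro nums s d _ hpre
  unfold Spec_sum_of_distances_after_queries_optimized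
  unfold sum_of_distances_after_queries_optimized sum_of_distances_after_queries_optimized_alt
  have hM : (10 : Int) ^ 9 + 7 = 1000000007 := by norm_num
  rw [hM]
  set arr := PySem.List.sorted (pvFinalA nums s d) (fun x => x) false with harr
  have hlen : arr.length = nums.length := by
    rw [harr, PySem.List.length_sorted]
    unfold pvFinalA
    rw [PySem.List.pyRange_zero_natCast, List.foldl_map,
        PySem.List.foldl_append_singleton_eq_map, List.nil_append, List.length_map,
        List.length_range]
  -- A side: fold with per-step mod = (Σ coefficient terms) % M = pvCsum arr 0 % M
  rw [PySem.List.pyRange_zero_natCast, List.foldl_map,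
      pvModfold (List.range nums.length)
        (fun k => (2 * (k : Int) - (nums.length : Int) + 1) * PySem.List.pyGetD arr (k : Int) 0)
        0 (le_refl 0) (by norm_num)]
  have hterms : (List.map
      (fun (k : Nat) => (2 * (k : Int) - (nums.length : Int) + 1) * PySem.List.pyGetD arr (k : Int) 0)
      (List.range nums.length)).sum = pvCsum arr 0 := by
    rw [← pvAsum arr 0, ← hlen]
    apply congrArg
    apply List.map_congr_left
    intro k _
    rw [PySem.List.pyGetD_natCast]
    ring_nf
  rw [hterms]
  -- B side: pairwise sum over the unsorted list = pairwise sum over arr = pvCsum arr 0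
  have hB : pvPairSum ((nums.zip s.toList).map (fun p => if p.2 = 'L' then p.1 - d else p.1 + d))
      = pvCsum arr 0 := by
    rw [← pvFinalA_eq nums s d hpre,
        pvPairSum_perm (PySem.List.sorted_perm (pvFinalA nums s d) (fun x => x) false).symm,
        ← harr, pvPairSum_sorted arr (PySem.List.sorted_pairwise (pvFinalA nums s d) (fun x => x))]
  rw [hB, PySem.Int.mod_eq_emod_of_pos (by norm_num)]
  ring_nf
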